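-- pv_equiv track=rewrite | github.com/FlaWww65535/arm | constraint_decoder.py | match_next_token
-- ===== SOURCE A (Python) =====
-- from typing import List
--
-- def match_next_token(sent: List[int], next_tokens: List[List[int]], num_tokens: int) -> List[int]:
--   cands_tokens = []
--
--   # # optimization for 'Candidate objects: ' long string when there is only one option
--   # if len(next_tokens) == 1:
--   #   next_token = next_tokens[0]
--   #   if num_tokens == len(next_token):
--   #     return None
--   #   return [next_token[num_tokens]]
--
--   for next_token in next_tokens:
--     # this word is completely outputted
--     if sent[-num_tokens:] == next_token:
--       return None
--     if sent[-num_tokens:] == next_token[:num_tokens]: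
--       cands_tokens.append(next_token[num_tokens])
--
--   assert len(cands_tokens) >= 1
--   return cands_tokens
-- ===== SOURCE B (Python) =====
-- from typing import List
--
-- def match_next_token(sent: List[int], next_tokens: List[List[int]], num_tokens: int) -> List[int]:
--   suffix = tuple(sent[-num_tokens:])
--   # if the suffix is itself a candidate word, that word is fully emitted
--   if suffix in {tuple(t) for t in next_tokens}:
--     return None
--   # hash index: group every continuation token under its length-num_tokens prefix,
--   # then answer with a single lookup of the suffix
--   pairs = [(tuple(t[:num_tokens]), t[num_tokens]) for t in next_tokens if num_tokens < len(t)]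
--   by_prefix = {}
--   for k, v in pairs:
--     by_prefix[k] = by_prefix.get(k, []) + [v]
--   cands_tokens = by_prefix.get(suffix, [])
--   assert len(cands_tokens) >= 1
--   return cands_tokens
-- ===== Notes on version B (the rewrite author's own statement) =====
-- stated objective: alternative
-- what changed: Replaces A's single early-exiting scan with an index-based approach: a set of the full words answers the fully-emitted test by membership, and a dictionary grouping every continuation under its prefix key answers the candidate list by one lookup.
-- outside the precondition, e.g. on match_next_token([1, 2], [[], [2, 9]], -1): A returns [9], B raises IndexError
import Mathlib
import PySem

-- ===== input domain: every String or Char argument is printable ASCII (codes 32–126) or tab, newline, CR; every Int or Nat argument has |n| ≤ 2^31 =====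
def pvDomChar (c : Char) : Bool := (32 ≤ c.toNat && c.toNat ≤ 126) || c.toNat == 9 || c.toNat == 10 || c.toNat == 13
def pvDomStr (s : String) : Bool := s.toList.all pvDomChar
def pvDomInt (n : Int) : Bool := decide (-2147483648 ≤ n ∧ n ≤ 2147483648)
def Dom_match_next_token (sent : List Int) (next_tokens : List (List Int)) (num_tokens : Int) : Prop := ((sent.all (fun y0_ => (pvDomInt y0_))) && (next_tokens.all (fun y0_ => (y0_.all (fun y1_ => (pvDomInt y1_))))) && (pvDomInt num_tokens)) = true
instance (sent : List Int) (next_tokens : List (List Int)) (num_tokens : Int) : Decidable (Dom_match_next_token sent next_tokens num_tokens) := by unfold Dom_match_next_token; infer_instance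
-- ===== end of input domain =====

-- B answers by indexes instead of a scan: a set of the full candidate words for the
-- fully-emitted test, and a dictionary grouping continuations by prefix for the candidate
-- list; same asymptotic cost, a different (index-based) algorithm.

-- ===== PORT A =====
-- A's loop: early `return None` on a full match, append `t[num_tokens]` on a prefix match,
-- final `assert len(cands) >= 1; return cands` (the failing assert / IndexError become `none`,
-- both excluded by Pre_).
def mntLoopA (suffix : List Int) (n : Int) : List (List Int) → List Int → Option (List Int)
  | [], cands => if 1 ≤ cands.length then some cands else none
  | t :: rest, cands =>
    if suffix = t then none
    else if suffix = PySem.List.slice t none (some n) then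
      match PySem.List.pyGet? t n with
      | some v => mntLoopA suffix n rest (cands ++ [v])
      | none => none
    else mntLoopA suffix n rest cands

def match_next_token (sent : List Int) (next_tokens : List (List Int)) (num_tokens : Int) : Option (List Int) :=
  mntLoopA (PySem.List.slice sent (some (-num_tokens)) none) num_tokens next_tokens []

-- ===== PORT B =====
-- B: set membership for the fully-emitted test, then a dict lookup on a prefix→continuations
-- grouping index. The `none` arm of the pyGet? match is Python's IndexError in the
-- comprehension (possible only for num_tokens < 0, outside Pre_).
def match_next_token_alt (sent : List Int) (next_tokens : List (List Int)) (num_tokens : Int) : Option (List Int) :=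
  let suffix := PySem.List.slice sent (some (-num_tokens)) none
  if suffix ∈ PySem.Set.ofList next_tokens then none
  else
    let pairs : List (List Int × Int) := next_tokens.filterMap (fun t =>
      if num_tokens < (t.length : Int) then
        match PySem.List.pyGet? t num_tokens with
        | some v => some (PySem.List.slice t none (some num_tokens), v)
        | none => none
      else none)
    let byPrefix := pairs.foldl (fun d p => d.modify p.1 [] (· ++ [p.2])) PySem.Dict.empty
    let cands := byPrefix.getD suffix []
    if 1 ≤ cands.length then some cands else none

-- ===== PRECONDITION & SPEC =====
-- Pre_ is exactly the inputs where BOTH programs return: it excludes A's AssertionError (no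
-- candidate matches the suffix), A's IndexError (a prefix match with an out-of-range
-- continuation index reached before any full match, possible only for negative num_tokens),
-- and the inputs where B's index build itself raises IndexError while A returns (negative
-- num_tokens with a too-short token; see the cite in claim.json).
def Pre_match_next_token (sent : List Int) (next_tokens : List (List Int)) (num_tokens : Int) : Prop :=
  (∃ t ∈ next_tokens,
      PySem.List.slice sent (some (-num_tokens)) none = t ∨
      (PySem.List.slice sent (some (-num_tokens)) none = PySem.List.slice t none (some num_tokens) ∧
        PySem.List.pyGet? t num_tokens ≠ none)) ∧
  (∀ t ∈ next_tokens.takeWhile (fun t => ¬(PySem.List.slice sent (some (-num_tokens)) none = t)),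
      ¬(PySem.List.slice sent (some (-num_tokens)) none = PySem.List.slice t none (some num_tokens) ∧
        PySem.List.pyGet? t num_tokens = none)) ∧
  (PySem.List.slice sent (some (-num_tokens)) none ∈ next_tokens ∨
    ∀ t ∈ next_tokens, num_tokens < (t.length : Int) → PySem.List.pyGet? t num_tokens ≠ none)
instance (sent : List Int) (next_tokens : List (List Int)) (num_tokens : Int) : Decidable (Pre_match_next_token sent next_tokens num_tokens) := by unfold Pre_match_next_token; infer_instance

def pvWitness_match_next_token : List Int × List (List Int) × Int := ([1, 2], [[2, 3]], 1)

def Spec_match_next_token (sent : List Int) (next_tokens : List (List Int)) (num_tokens : Int) (out : Option (List Int)) : Prop := out = match_next_token_alt sent next_tokens num_tokens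
instance (sent : List Int) (next_tokens : List (List Int)) (num_tokens : Int) (out : Option (List Int)) : Decidable (Spec_match_next_token sent next_tokens num_tokens out) := by unfold Spec_match_next_token; infer_instance

-- ===== CLAIM =====
def Claim_equal_match_next_token : Prop := ∀ (sent : List Int) (next_tokens : List (List Int)) (num_tokens : Int), Dom_match_next_token sent next_tokens num_tokens → Pre_match_next_token sent next_tokens num_tokens → Spec_match_next_token sent next_tokens num_tokens (match_next_token sent next_tokens num_tokens)

-- ===== LEMMAS AND PROOFS =====

-- For a bound at least the (nonnegative) length, the prefix slice is the whole token.
lemma sliceAll {t : List Int} {n : Int} (hlen : (t.length : Int) ≤ n) :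
    PySem.List.slice t none (some n) = t := by
  rw [PySem.List.slice_to t (by omega)]
  exact List.take_of_length_le (by omega)

-- A's loop equals "None on a full match, else the candidates list with the length assert",
-- for any accumulator, as long as no token before the first full match is a prefix match
-- with an out-of-range continuation index (A's IndexError).
lemma loopA_eq (suffix : List Int) (n : Int) :
    ∀ (toks : List (List Int)) (cands : List Int),
      (∀ t ∈ toks.takeWhile (fun t => ¬(suffix = t)),
          ¬(suffix = PySem.List.slice t none (some n) ∧ PySem.List.pyGet? t n = none)) →
      mntLoopA suffix n toks cands =
        if toks.any (fun t => suffix = t) then none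
        else
          (if 1 ≤ (cands ++ toks.filterMap (fun t =>
              if suffix = PySem.List.slice t none (some n) then PySem.List.pyGet? t n else none)).length
           then some (cands ++ toks.filterMap (fun t =>
              if suffix = PySem.List.slice t none (some n) then PySem.List.pyGet? t n else none))
           else none) := by
  intro toks
  induction toks with
  | nil => intro cands _; simp [mntLoopA]
  | cons t rest ih =>
    intro cands hok
    by_cases hf : suffix = t
    · simp [mntLoopA, hf]
    · have htw : (t :: rest).takeWhile (fun t => ¬(suffix = t)) =
          t :: rest.takeWhile (fun t => ¬(suffix = t)) := by
        simp [hf]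
      rw [htw] at hok
      have hokr := fun u hu => hok u (List.mem_cons_of_mem _ hu)
      have hokt := hok t List.mem_cons_self
      by_cases hp : suffix = PySem.List.slice t none (some n)
      · cases hg : PySem.List.pyGet? t n with
        | none => exact absurd ⟨hp, hg⟩ hokt
        | some v =>
          subst hp
          simp only [mntLoopA, if_neg hf, hg, ih _ hokr, List.any_cons,
            List.filterMap_cons]
          simp [hf, List.append_assoc]
      · simp only [mntLoopA, if_neg hf, if_neg hp, ih _ hokr, List.any_cons, List.filterMap_cons]
        simp [hf]

-- B's grouped lookup equals A's collected candidates, given no full match and that every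
-- token long enough to be indexed has an in-range continuation index (B returns): tokens
-- with length ≤ n can then only prefix-match by being a full match.
lemma collect_eq (suffix : List Int) (n : Int) :
    ∀ toks : List (List Int), (∀ t ∈ toks, suffix ≠ t) →
      (∀ t ∈ toks, n < (t.length : Int) → PySem.List.pyGet? t n ≠ none) →
      ((toks.filterMap (fun t =>
          if n < (t.length : Int) then
            match PySem.List.pyGet? t n with
            | some v => some (PySem.List.slice t none (some n), v)
            | none => none
          else none)).filter (fun p => p.1 == suffix)).map (fun p => p.2)
      = toks.filterMap (fun t =>
          if suffix = PySem.List.slice t none (some n) then PySem.List.pyGet? t n else none) := by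
  intro toks
  induction toks with
  | nil => intro _ _; simp
  | cons t rest ih =>
    intro hnf hv
    have hrest := ih (fun u hu => hnf u (List.mem_cons_of_mem _ hu))
      (fun u hu => hv u (List.mem_cons_of_mem _ hu))
    by_cases hlt : n < (t.length : Int)
    · obtain ⟨v, hsome⟩ := Option.ne_none_iff_exists'.mp (hv t List.mem_cons_self hlt)
      by_cases hp : suffix = PySem.List.slice t none (some n)
      · subst hp
        simp [hlt, hsome, hrest]
      · simp only [List.filterMap_cons, if_pos hlt, hsome]
        have : ¬ (PySem.List.slice t none (some n) == suffix) = true := by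
          simp [beq_iff_eq]; intro h; exact hp h.symm
        simp [this, hp, hrest]
    · have hfull : PySem.List.slice t none (some n) = t := sliceAll (by omega)
      have hp : ¬ suffix = PySem.List.slice t none (some n) := by
        rw [hfull]; exact hnf t List.mem_cons_self
      simp [hlt, hp, hrest]

-- ===== VERDICT =====
theorem match_next_token_spec : Claim_equal_match_next_token := by
  intro sent next_tokens num_tokens _ hpre
  obtain ⟨-, h2, h3⟩ := hpre
  unfold Spec_match_next_token match_next_token match_next_token_alt
  rw [loopA_eq _ _ _ _ h2]
  by_cases hfull : (PySem.List.slice sent (some (-num_tokens)) none) ∈ next_tokens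
  · simp [hfull, List.any_eq_true, PySem.Set.mem_ofList]
  · have hnf : ∀ t ∈ next_tokens, PySem.List.slice sent (some (-num_tokens)) none ≠ t := by
      intro t ht h; exact hfull (h ▸ ht)
    have hv := h3.resolve_left hfull
    have hany : next_tokens.any (fun t => PySem.List.slice sent (some (-num_tokens)) none = t) = false := by
      simp only [List.any_eq_false, decide_eq_true_eq]
      exact hnf
    rw [hany]
    simp only [Bool.false_eq_true, if_false, PySem.Set.mem_ofList, hfull]
    rw [PySem.Dict.getD_foldl_modify_append, PySem.Dict.getD_empty]
    rw [collect_eq _ _ _ hnf hv]
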